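-- pv_equiv track=rewrite | github.com/shobrook/topigraph | topigraph/topigraph.py | vectorize_sentences
-- ===== SOURCE A (Python) =====
-- import heapq
-- from collections import defaultdict
--
-- def vectorize_sentences(pp_transcript, max_vec_size=25):
--     dataset = []
--     word2count = defaultdict(lambda: 0)
--     for sentence in pp_transcript:
--         sentence_for_dataset = []
--         for (lemma, word) in sentence:
--             word2count[lemma] += 1
--             sentence_for_dataset.append(word)
--
--         dataset.append(sentence_for_dataset)
--
--     freq_words = heapq.nlargest(max_vec_size, word2count, key=word2count.get)
--     sent_vectors = []
--     for sentence in dataset: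
--         sent_vector = [sentence.count(w) for w in freq_words]
--         sent_vectors.append(sent_vector)
--
--     return sent_vectors, dataset
-- ===== SOURCE B (Python) =====
-- import heapq
-- from collections import Counter
--
-- def vectorize_sentences(pp_transcript, max_vec_size=25):
--     dataset = [[word for (_lemma, word) in sentence] for sentence in pp_transcript]
--     word2count = Counter(lemma for sentence in pp_transcript for (lemma, _word) in sentence)
--     freq_words = heapq.nlargest(max_vec_size, word2count, key=word2count.get)
--     pos = {w: i for i, w in enumerate(freq_words)}
--     sent_vectors = []
--     for sentence in dataset:
--         vec = [0] * len(freq_words)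
--         for w in sentence:
--             i = pos.get(w)
--             if i is not None:
--                 vec[i] += 1
--         sent_vectors.append(vec)
--     return sent_vectors, dataset
-- ===== Notes on version B (the rewrite author's own statement) =====
-- stated objective: faster
-- what changed: B builds dataset and the lemma counter by comprehensions/Counter instead of nested accumulator loops, keeps the identical nlargest call, and replaces the per-sentence repeated sentence.count scans (one scan per frequent word) by an inverted single scatter pass: an index table pos = {word: i} and one loop over the sentence incrementing vec[pos[w]].
import Mathlib
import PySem

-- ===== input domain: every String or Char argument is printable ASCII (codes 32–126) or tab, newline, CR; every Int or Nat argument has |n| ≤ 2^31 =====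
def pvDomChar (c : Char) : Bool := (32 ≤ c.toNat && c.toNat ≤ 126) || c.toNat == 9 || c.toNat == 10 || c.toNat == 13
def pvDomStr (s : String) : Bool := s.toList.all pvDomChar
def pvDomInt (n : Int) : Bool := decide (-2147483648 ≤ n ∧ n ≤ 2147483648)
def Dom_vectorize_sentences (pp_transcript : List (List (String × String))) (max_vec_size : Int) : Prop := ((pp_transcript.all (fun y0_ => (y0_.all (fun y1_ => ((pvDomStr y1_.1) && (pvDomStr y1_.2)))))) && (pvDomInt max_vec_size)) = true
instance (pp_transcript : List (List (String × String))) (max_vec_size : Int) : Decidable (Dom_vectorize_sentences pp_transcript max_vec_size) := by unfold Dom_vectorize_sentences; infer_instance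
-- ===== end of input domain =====

-- B replaces the per-sentence repeated `.count` scans (one per frequent word) by an index
-- table and a single scatter pass over the sentence; faster: O(S*(L+K)) vs O(S*L*K).

-- ===== PORT A =====
-- A-side helper: the body of A's outer `for sentence in pp_transcript` loop
def pvStepA (st : List (List String) × PySem.Dict String Int) (sentence : List (String × String)) :
    List (List String) × PySem.Dict String Int :=
  let inner := sentence.foldl
    (fun (q : PySem.Dict String Int × List String) lw =>
      (q.1.modify lw.1 0 (· + 1), q.2 ++ [lw.2])) (st.2, ([] : List String))
  (st.1 ++ [inner.2], inner.1)

-- heapq.nlargest(n, it, key) is ported as its documented equivalent sorted(it, key, reverse=True)[:n]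
def vectorize_sentences (pp_transcript : List (List (String × String))) (max_vec_size : Int) : List (List Int) × List (List String) :=
  let st := pp_transcript.foldl pvStepA (([] : List (List String)), (PySem.Dict.empty : PySem.Dict String Int))
  let dataset := st.1
  let word2count := st.2
  let freq_words := (PySem.List.sorted word2count.keys (fun w => word2count.getD w 0) true).take max_vec_size.toNat
  let sent_vectors := dataset.foldl
    (fun acc sentence => acc ++ [freq_words.map (fun w => (sentence.count w : Int))]) []
  (sent_vectors, dataset)

-- ===== PORT B =====
-- same nlargest call as A, ported the same way
def vectorize_sentences_alt (pp_transcript : List (List (String × String))) (max_vec_size : Int) : List (List Int) × List (List String) :=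
  let dataset := pp_transcript.map (fun sentence => sentence.map (·.2))
  let word2count := PySem.Dict.counter (pp_transcript.flatMap (fun sentence => sentence.map (·.1)))
  let freq_words := (PySem.List.sorted word2count.keys (fun w => word2count.getD w 0) true).take max_vec_size.toNat
  let pos := (PySem.List.enumerate freq_words).foldl
    (fun (d : PySem.Dict String Int) p => d.insert p.2 p.1) PySem.Dict.empty
  let sent_vectors := dataset.foldl
    (fun acc sentence =>
      acc ++ [sentence.foldl
        (fun vec w =>
          match pos.get? w with
          | some i => vec.set i.toNat (vec.getD i.toNat 0 + 1)
          | none => vec)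
        (List.replicate freq_words.length (0 : Int))]) []
  (sent_vectors, dataset)

-- ===== PRECONDITION & SPEC =====
def Spec_vectorize_sentences (pp_transcript : List (List (String × String))) (max_vec_size : Int) (out : List (List Int) × List (List String)) : Prop := out = vectorize_sentences_alt pp_transcript max_vec_size
instance (pp_transcript : List (List (String × String))) (max_vec_size : Int) (out : List (List Int) × List (List String)) : Decidable (Spec_vectorize_sentences pp_transcript max_vec_size out) := by unfold Spec_vectorize_sentences; infer_instance

-- ===== CLAIM (what is proved, stated in full; the proofs are below) =====
def Claim_equal_vectorize_sentences : Prop := ∀ (pp_transcript : List (List (String × String))) (max_vec_size : Int), Dom_vectorize_sentences pp_transcript max_vec_size → Spec_vectorize_sentences pp_transcript max_vec_size (vectorize_sentences pp_transcript max_vec_size)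

-- ===== LEMMAS AND PROOFS =====

-- A's inner sentence loop splits into the counting fold over lemmas and the word list
theorem pvInnerFold (sentence : List (String × String)) (d : PySem.Dict String Int) (l : List String) :
    sentence.foldl (fun (q : PySem.Dict String Int × List String) lw =>
        (q.1.modify lw.1 0 (· + 1), q.2 ++ [lw.2])) (d, l)
      = ((sentence.map (fun x => x.1)).foldl (fun d x => d.modify x 0 (· + 1)) d,
         l ++ sentence.map Prod.snd) := by
  induction sentence generalizing d l with
  | nil => simp
  | cons p t ih => simp [ih]

theorem pvStepA_eq (st : List (List String) × PySem.Dict String Int) (sentence : List (String × String)) :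
    pvStepA st sentence
      = (st.1 ++ [sentence.map (fun x => x.2)],
         (sentence.map (fun x => x.1)).foldl (fun d x => d.modify x 0 (· + 1)) st.2) := by
  unfold pvStepA
  rw [pvInnerFold]
  simp

-- A's outer loop builds the dataset and the same counter B builds from the flattened lemmas
theorem pvOuterFold (pp : List (List (String × String))) (ds : List (List String)) (d : PySem.Dict String Int) :
    pp.foldl pvStepA (ds, d)
      = (ds ++ pp.map (fun s => s.map (fun x => x.2)),
         (pp.flatMap (fun s => s.map (fun x => x.1))).foldl (fun d x => d.modify x 0 (· + 1)) d) := by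
  induction pp generalizing ds d with
  | nil => simp
  | cons s t ih =>
    rw [List.foldl_cons, pvStepA_eq, ih]
    simp [List.foldl_append]

-- lookup in the index dict built from `enumerate ws`
theorem pvPosGet (ws : List String) (w : String) :
    ∀ (s : Int) (d : PySem.Dict String Int), ws.Nodup →
    ((PySem.List.enumerate ws s).foldl (fun (d : PySem.Dict String Int) p => d.insert p.2 p.1) d).get? w
      = if w ∈ ws then some (s + (ws.idxOf w : Int)) else d.get? w := by
  induction ws with
  | nil => intro s d _; simp [PySem.List.enumerate]
  | cons x t ih =>
    intro s d hnd
    rw [PySem.List.enumerate_cons]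
    simp only [List.foldl_cons]
    rw [ih (s + 1) (d.insert x s) hnd.of_cons]
    by_cases hw : w = x
    · rw [← hw]
      have hwt : w ∉ t := hw ▸ (List.nodup_cons.mp hnd).1
      simp [hwt, PySem.Dict.get?_insert_self]
    · by_cases hmem : w ∈ t
      · simp only [hmem, if_true, List.mem_cons, hw, false_or, if_true]
        rw [List.idxOf_cons_ne _ (by simpa using Ne.symm hw)]
        congr 1
        push_cast
        ring
      · have hnot : w ∉ (x :: t) := by simp [hw, hmem]
        simp [hmem, hnot, PySem.Dict.get?_insert_of_ne _ _ hw]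

-- updating a mapped list at the index of a member
theorem pvSetMap (ws : List String) (hnd : ws.Nodup) (g : String → Int) (w : String) (hw : w ∈ ws) :
    (ws.map g).set (ws.idxOf w) (g w + 1)
      = ws.map (fun x => if x = w then g x + 1 else g x) := by
  induction ws with
  | nil => simp at hw
  | cons y t ih =>
    by_cases hyw : y = w
    · rw [← hyw] at *
      have hwt : y ∉ t := (List.nodup_cons.mp hnd).1
      simp only [List.idxOf_cons_self, List.map_cons, List.set_cons_zero]
      congr 1
      apply List.map_congr_left
      intro x hx
      have hne : x ≠ y := fun h => hwt (h ▸ hx)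
      simp [hne]
    · have hwt : w ∈ t := by
        rcases List.mem_cons.mp hw with h | h
        · exact absurd h.symm hyw
        · exact h
      rw [List.idxOf_cons_ne _ (by simpa using hyw)]
      simp only [List.map_cons, List.set_cons_succ]
      rw [ih (List.nodup_cons.mp hnd).2 hwt]
      simp [hyw]

-- the heart: B's single scatter pass over a sentence computes A's per-word counts
theorem pvScatter (s ws : List String) (hnd : ws.Nodup) (g : String → Int) :
    s.foldl
      (fun vec w =>
        match ((PySem.List.enumerate ws 0).foldl (fun (d : PySem.Dict String Int) p => d.insert p.2 p.1) PySem.Dict.empty).get? w with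
        | some i => vec.set i.toNat (vec.getD i.toNat 0 + 1)
        | none => vec)
      (ws.map g)
      = ws.map (fun x => g x + (s.count x : Int)) := by
  induction s generalizing g with
  | nil => simp
  | cons w t ih =>
    simp only [List.foldl_cons]
    rw [pvPosGet ws w 0 PySem.Dict.empty hnd]
    by_cases hw : w ∈ ws
    · simp only [hw, if_true]
      have hlt : ws.idxOf w < ws.length := List.idxOf_lt_length_of_mem hw
      have hidx : ((0 : Int) + (ws.idxOf w : Int)).toNat = ws.idxOf w := by simp
      have hgetD : (ws.map g).getD (ws.idxOf w) 0 = g w := by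
        rw [List.getD_eq_getElem _ _ (by simpa using hlt)]
        simp [List.getElem_idxOf hlt]
      simp only [hidx, hgetD]
      rw [pvSetMap ws hnd g w hw, ih (fun x => if x = w then g x + 1 else g x)]
      apply List.map_congr_left
      intro x _
      rcases eq_or_ne x w with h | h
      · subst h
        simp only [List.count_cons_self]
        push_cast
        ring
      · rw [List.count_cons_of_ne (by simpa using h.symm)]
        simp [h]
    · simp only [hw, if_false]
      rw [show PySem.Dict.get? PySem.Dict.empty w = none from rfl]
      rw [ih g]
      apply List.map_congr_left
      intro x hx
      have hne : x ≠ w := fun h => hw (h ▸ hx)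
      rw [List.count_cons_of_ne (by simpa using hne.symm)]

-- ===== VERDICT (by name: the statement is the Claim_ definition above) =====
theorem vectorize_sentences_spec : Claim_equal_vectorize_sentences := by
  intro pp n _
  unfold Spec_vectorize_sentences vectorize_sentences vectorize_sentences_alt
  rw [pvOuterFold]
  simp only [List.nil_append]
  rw [PySem.Dict.counter_eq_foldl]
  set d := (pp.flatMap (fun s => s.map (fun x => x.1))).foldl (fun d x => d.modify x 0 (· + 1)) (PySem.Dict.empty : PySem.Dict String Int) with hd
  have hback : PySem.Dict.counter (pp.flatMap (fun s => s.map (fun x => x.1))) = d := PySem.Dict.counter_eq_foldl _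
  set freq := (PySem.List.sorted d.keys (fun w => d.getD w 0) true).take n.toNat with hfreq
  have hnd : freq.Nodup := by
    have h1 : d.keys.Nodup := hback ▸ PySem.Dict.nodup_keys_counter _
    have h2 : (PySem.List.sorted d.keys (fun w => d.getD w 0) true).Nodup :=
      ((PySem.List.sorted_perm d.keys _ true).nodup_iff).mpr h1
    exact h2.sublist (List.take_sublist _ _)
  refine Prod.ext ?_ rfl
  simp only [PySem.List.foldl_append_singleton_eq_map, List.nil_append]
  apply List.map_congr_left
  intro sentence _
  have hrep : List.replicate freq.length (0 : Int) = freq.map (fun _ => (0 : Int)) := by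
    simp [List.map_const']
  rw [hrep, pvScatter sentence freq hnd (fun _ => 0)]
  simp
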